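-- pv_equiv track=rewrite | github.com/ascavin/PI2C | efficiency.py | findMarbleCrownCenter
-- ===== SOURCE A (Python) =====
-- def getMarbleLocation(state,symbol):#return the location of a marble
-- 	locations=[]
-- 	for i,line in enumerate(state['board']):
-- 		for e,column in enumerate(line) :
-- 			if (state['board'][i][e]==symbol):
-- 				locations.append((i,e))
-- 	return locations
--
-- def getCrownCenter():
-- 	crown = [
-- 		(2,2),
-- 		(2,3),
-- 		(2,4),
-- 		(3,2),
-- 		(3,3),
-- 		(3,4),
-- 		(3,5),
-- 		(4,2),
-- 		(4,3),
-- 		(4,4),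
-- 		(4,5),
-- 		(4,6),
-- 		(5,3),
-- 		(5,4),
-- 		(5,5),
-- 		(5,6),
-- 		(6,4),
-- 		(6,5),
-- 		(6,6)
-- 		]
-- 	return crown
--
-- def findMarbleCrownCenter(state,symbol):
-- 	marbles=getMarbleLocation(state,symbol)
-- 	crownCenters = getCrownCenter()
-- 	marbleInCenter= []
-- 	for marble in marbles :
-- 		for crownCenter in crownCenters:
-- 			if (crownCenter==marble):
-- 				marbleInCenter.append(marble)
-- 	return marbleInCenter
-- ===== SOURCE B (Python) =====
-- def getCrownCenter():
-- 	crown = [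
-- 		(2,2),
-- 		(2,3),
-- 		(2,4),
-- 		(3,2),
-- 		(3,3),
-- 		(3,4),
-- 		(3,5),
-- 		(4,2),
-- 		(4,3),
-- 		(4,4),
-- 		(4,5),
-- 		(4,6),
-- 		(5,3),
-- 		(5,4),
-- 		(5,5),
-- 		(5,6),
-- 		(6,4),
-- 		(6,5),
-- 		(6,6)
-- 		]
-- 	return crown
--
-- def findMarbleCrownCenter(state, symbol):
-- 	# Probe only the 19 fixed crown-center cells instead of scanning the whole board.
-- 	# The crown list is row-major, the same order as the board scan, so the output order matches.
-- 	board = state['board']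
-- 	return [(i, e) for (i, e) in getCrownCenter()
-- 	        if i < len(board) and e < len(board[i]) and board[i][e] == symbol]
-- ===== Notes on version B (the rewrite author's own statement) =====
-- stated objective: faster
-- what changed: Instead of collecting every marble on the whole board and testing each against the 19 crown cells, B probes only the 19 fixed crown-center cells (with bounds checks) in their row-major order.
import Mathlib
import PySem

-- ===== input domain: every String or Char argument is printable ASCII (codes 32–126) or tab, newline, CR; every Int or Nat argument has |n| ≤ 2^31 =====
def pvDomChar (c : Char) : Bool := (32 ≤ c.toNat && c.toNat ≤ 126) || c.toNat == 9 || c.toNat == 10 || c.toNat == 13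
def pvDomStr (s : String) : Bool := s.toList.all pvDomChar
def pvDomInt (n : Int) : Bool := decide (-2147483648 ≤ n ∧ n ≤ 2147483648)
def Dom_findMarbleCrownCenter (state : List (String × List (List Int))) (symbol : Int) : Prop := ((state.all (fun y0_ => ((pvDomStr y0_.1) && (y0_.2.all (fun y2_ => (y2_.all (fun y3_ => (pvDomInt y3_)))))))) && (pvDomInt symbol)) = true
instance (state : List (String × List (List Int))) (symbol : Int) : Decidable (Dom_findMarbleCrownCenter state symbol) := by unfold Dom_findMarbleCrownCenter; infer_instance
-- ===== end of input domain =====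

-- B probes only the 19 fixed crown-center cells (row-major, with bounds checks) instead of
-- scanning the whole board for marbles first: asymptotically less work on large boards.


-- ===== PORT A =====
-- shared helper getCrownCenter() (the fixed 19 crown-center coordinates, row-major)
def pvGetCrownCenter : List (Int × Int) :=
  [(2,2),(2,3),(2,4),(3,2),(3,3),(3,4),(3,5),(4,2),(4,3),(4,4),(4,5),(4,6),
   (5,3),(5,4),(5,5),(5,6),(6,4),(6,5),(6,6)]

-- helper getMarbleLocation(state, symbol): state['board'] is the first-match lookup;
-- the condition re-indexes state['board'][i][e] exactly as the Python does (pyGet? with the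
-- enumerate indices, always nonnegative, so it is exact).
def pvGetMarbleLocation (state : List (String × List (List Int))) (symbol : Int) : List (Int × Int) :=
  let board := ((PySem.Dict.mk state).get? "board").getD []
  (PySem.List.enumerate board).foldl (fun locs il =>
    (PySem.List.enumerate il.2).foldl (fun locs2 ec =>
      if ((PySem.List.pyGet? board il.1).bind (fun row => PySem.List.pyGet? row ec.1)) == some symbol
      then locs2 ++ [(il.1, ec.1)] else locs2) locs) []

def findMarbleCrownCenter (state : List (String × List (List Int))) (symbol : Int) : List (Int × Int) :=
  let marbles := pvGetMarbleLocation state symbol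
  let crownCenters := pvGetCrownCenter
  marbles.foldl (fun acc marble =>
    crownCenters.foldl (fun acc2 c => if c == marble then acc2 ++ [marble] else acc2) acc) []

-- ===== PORT B =====
-- Source B: probe each crown cell; bounds-checked indexing board[i][e] (crown coords are the
-- literal nonnegative ints, so `.toNat` indexing under the Int bound checks is exact).
def findMarbleCrownCenter_alt (state : List (String × List (List Int))) (symbol : Int) : List (Int × Int) :=
  let board := ((PySem.Dict.mk state).get? "board").getD []
  pvGetCrownCenter.filter (fun c =>
    decide (c.1 < (board.length : Int)) &&
    decide (c.2 < ((board.getD c.1.toNat []).length : Int)) &&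
    ((board.getD c.1.toNat []).getD c.2.toNat 0 == symbol))

-- ===== PRECONDITION & SPEC =====
-- Pre_ excludes exactly the states without a "board" key, on which the Python A raises KeyError.
def Pre_findMarbleCrownCenter (state : List (String × List (List Int))) (symbol : Int) : Prop :=
  ((PySem.Dict.mk state).get? "board").isSome = true
instance (state : List (String × List (List Int))) (symbol : Int) : Decidable (Pre_findMarbleCrownCenter state symbol) := by unfold Pre_findMarbleCrownCenter; infer_instance
def pvWitness_findMarbleCrownCenter : (List (String × List (List Int))) × Int := ([("board", [[0,0,0,0,0,0,0],[0,0,0,0,0,0,0],[0,0,1,0,1,0,0],[0,0,0,1,0,0,0],[0,0,1,0,0,0,1],[0,0,0,1,0,1,0],[0,0,0,0,1,0,0]])], 1)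

def Spec_findMarbleCrownCenter (state : List (String × List (List Int))) (symbol : Int) (out : List (Int × Int)) : Prop := out = findMarbleCrownCenter_alt state symbol
instance (state : List (String × List (List Int))) (symbol : Int) (out : List (Int × Int)) : Decidable (Spec_findMarbleCrownCenter state symbol out) := by unfold Spec_findMarbleCrownCenter; infer_instance

-- ===== CLAIM (what is proved, stated in full; the proofs are below) =====
def Claim_equal_findMarbleCrownCenter : Prop := ∀ (state : List (String × List (List Int))) (symbol : Int), Dom_findMarbleCrownCenter state symbol → Pre_findMarbleCrownCenter state symbol → Spec_findMarbleCrownCenter state symbol (findMarbleCrownCenter state symbol)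

-- ===== LEMMAS AND PROOFS =====

-- the strict row-major (lexicographic) order both result lists follow
def pvLex (a b : Int × Int) : Prop := a.1 < b.1 ∨ (a.1 = b.1 ∧ a.2 < b.2)

-- the marble list, written as a flatMap (what A's nested append-loops compute)
def pvMarbles (board : List (List Int)) (symbol : Int) : List (Int × Int) :=
  (PySem.List.enumerate board).flatMap (fun il =>
    ((PySem.List.enumerate il.2).filter (fun ec =>
      ((PySem.List.pyGet? board il.1).bind (fun row => PySem.List.pyGet? row ec.1)) == some symbol)).map
      (fun ec => (il.1, ec.1)))

theorem pvGetMarbleLocation_eq (state : List (String × List (List Int))) (symbol : Int) :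
    pvGetMarbleLocation state symbol
      = pvMarbles (((PySem.Dict.mk state).get? "board").getD []) symbol := by
  unfold pvGetMarbleLocation pvMarbles
  simp only [PySem.List.foldl_append_if, PySem.List.foldl_append_eq_flatMap, List.nil_append]


theorem mem_pvMarbles (board : List (List Int)) (symbol : Int) (x : Int × Int) :
    x ∈ pvMarbles board symbol
      ↔ ∃ (i : Nat) (hi : i < board.length) (e : Nat) (he : e < board[i].length),
          x = ((i : Int), (e : Int)) ∧ board[i][e] = symbol := by
  unfold pvMarbles
  simp only [List.mem_flatMap, PySem.List.mem_enumerate_iff, List.mem_filter, List.mem_map]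
  constructor
  · rintro ⟨il, ⟨i, hi, rfl⟩, ec, ⟨⟨e, he, rfl⟩, hcond⟩, rfl⟩
    simp only [zero_add] at *
    refine ⟨i, hi, e, he, rfl, ?_⟩
    simp [PySem.List.pyGet?_natCast, hi, he] at hcond
    exact hcond
  · rintro ⟨i, hi, e, he, rfl, hsym⟩
    refine ⟨(i, board[i]), ⟨i, hi, by simp⟩, (e, board[i][e]), ⟨⟨e, he, by simp⟩, ?_⟩, by simp⟩
    simp [PySem.List.pyGet?_natCast, hi, he, hsym]

theorem pairwise_pvMarbles (board : List (List Int)) (symbol : Int) :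
    (pvMarbles board symbol).Pairwise pvLex := by
  unfold pvMarbles
  rw [List.pairwise_flatMap]
  constructor
  · intro il _
    refine List.Pairwise.map _ ?_ (((PySem.List.pairwise_lt_enumerate il.2 0).filter _))
    intro a b h
    exact Or.inr ⟨rfl, h⟩
  · refine (PySem.List.pairwise_lt_enumerate board 0).imp ?_
    intro a b h x hx y hy
    simp only [List.mem_map] at hx hy
    obtain ⟨_, _, rfl⟩ := hx
    obtain ⟨_, _, rfl⟩ := hy
    exact Or.inl h

-- each marble's inner crown loop contributes [m] iff m is a crown cell (crown has no duplicates)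
theorem pvCrownHits (m : Int × Int) :
    (pvGetCrownCenter.filter (fun c => c == m)).map (fun _ => m)
      = if m ∈ pvGetCrownCenter then [m] else [] := by
  rw [List.filter_beq, List.map_replicate]
  by_cases hm : m ∈ pvGetCrownCenter
  · rw [List.count_eq_one_of_mem (by decide) hm]
    simp [hm]
  · rw [List.count_eq_zero_of_not_mem hm]
    simp [hm]

theorem pvFlatMap_if_mem {l s : List (Int × Int)} :
    (l.flatMap (fun m => if m ∈ s then [m] else [])) = l.filter (fun m => decide (m ∈ s)) := by
  induction l with
  | nil => rfl
  | cons x xs ih =>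
    by_cases hx : x ∈ s <;> simp [List.flatMap_cons, hx, ih]

theorem findMarbleCrownCenter_spec : Claim_equal_findMarbleCrownCenter := by
  intro state symbol _ _
  unfold Spec_findMarbleCrownCenter findMarbleCrownCenter findMarbleCrownCenter_alt
  set board := ((PySem.Dict.mk state).get? "board").getD [] with hb
  -- A's nested loops = the marble list filtered by crown membership
  simp only [PySem.List.foldl_append_if, PySem.List.foldl_append_eq_flatMap, List.nil_append,
    pvGetMarbleLocation_eq, ← hb, pvCrownHits, pvFlatMap_if_mem]
  -- B's crown probe = the crown list filtered by marble membership
  have hB : pvGetCrownCenter.filter (fun c =>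
        decide (c.1 < (board.length : Int)) &&
        decide (c.2 < ((board.getD c.1.toNat []).length : Int)) &&
        ((board.getD c.1.toNat []).getD c.2.toNat 0 == symbol))
      = pvGetCrownCenter.filter (fun c => decide (c ∈ pvMarbles board symbol)) := by
    apply List.filter_congr
    intro c hc
    have hnn : 0 ≤ c.1 ∧ 0 ≤ c.2 := by
      revert hc; unfold pvGetCrownCenter; intro hc; fin_cases hc <;> exact ⟨by norm_num, by norm_num⟩
    rw [Bool.eq_iff_iff]
    simp only [Bool.and_eq_true, decide_eq_true_eq, beq_iff_eq, mem_pvMarbles board symbol c]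
    constructor
    · rintro ⟨⟨h1, h2⟩, h3⟩
      have hi : c.1.toNat < board.length := by omega
      have he : c.2.toNat < (board[c.1.toNat]).length := by
        rw [List.getD_eq_getElem board [] hi] at h2; omega
      refine ⟨c.1.toNat, hi, c.2.toNat, he, ?_, ?_⟩
      · ext <;> simp [Int.toNat_of_nonneg hnn.1, Int.toNat_of_nonneg hnn.2]
      · rw [List.getD_eq_getElem board [] hi] at h3
        rwa [List.getD_eq_getElem _ 0 he] at h3
    · rintro ⟨i, hi, e, he, hc', hsym⟩
      obtain ⟨c1, c2⟩ := c
      obtain ⟨rfl, rfl⟩ := Prod.mk.inj hc'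
      simp only [Int.toNat_natCast]
      rw [List.getD_eq_getElem board [] hi, List.getD_eq_getElem _ 0 he]
      exact ⟨⟨by exact_mod_cast hi, by exact_mod_cast he⟩, hsym⟩
  rw [hB]
  -- both sides are strictly row-major sorted with the same members
  have hMpw := pairwise_pvMarbles board symbol
  have hMnd : (pvMarbles board symbol).Nodup :=
    hMpw.imp (fun {a b} h => by rintro rfl; simp only [pvLex] at h; omega)
  have hCpw : pvGetCrownCenter.Pairwise pvLex :=
    (by decide : pvGetCrownCenter.Pairwise (fun a b => a.1 < b.1 ∨ (a.1 = b.1 ∧ a.2 < b.2)))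
  have hCnd : pvGetCrownCenter.Nodup := by decide
  apply List.Perm.eq_of_pairwise
    (le := pvLex)
    (fun a b _ _ h1 h2 => by
      obtain ⟨a1, a2⟩ := a; obtain ⟨b1, b2⟩ := b
      exfalso; simp only [pvLex] at h1 h2; omega)
    (hMpw.filter _) (hCpw.filter _)
  rw [List.perm_ext_iff_of_nodup (hMnd.filter _) (hCnd.filter _)]
  intro x
  simp only [List.mem_filter, decide_eq_true_eq]
  tauto
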